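-- pv_equiv track=rewrite | github.com/Indranil2020/DFT_visual | DFT_MCP/psi4/psi4-mcp-server/src/psi4_mcp/utils/conversion/units.py | _is_simple_float
-- ===== SOURCE A (Python) =====
-- def _is_simple_float(s: str) -> bool:
--     """Check if string is a simple float (no exponent)."""
--     if not s:
--         return False
--     parts = s.split('.')
--     if len(parts) > 2:
--         return False
--     for part in parts:
--         if part and not part.isdigit():
--             return False
--     return True
-- ===== SOURCE B (Python) =====
-- def _is_simple_float(s: str) -> bool:
--     """Check if string is a simple float (no exponent): single pass, counting dots."""
--     if not s:
--         return False
--     dots = 0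
--     for c in s:
--         if c == '.':
--             dots += 1
--             if dots > 1:
--                 return False
--         elif not c.isdigit():
--             return False
--     return True
-- ===== Notes on version B (the rewrite author's own statement) =====
-- stated objective: simpler
-- what changed: Replaces the split-on-dot-then-loop-over-parts decomposition with a single character scan that counts dots and rejects any non-digit non-dot character (early exit at a second dot).
import Mathlib
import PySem

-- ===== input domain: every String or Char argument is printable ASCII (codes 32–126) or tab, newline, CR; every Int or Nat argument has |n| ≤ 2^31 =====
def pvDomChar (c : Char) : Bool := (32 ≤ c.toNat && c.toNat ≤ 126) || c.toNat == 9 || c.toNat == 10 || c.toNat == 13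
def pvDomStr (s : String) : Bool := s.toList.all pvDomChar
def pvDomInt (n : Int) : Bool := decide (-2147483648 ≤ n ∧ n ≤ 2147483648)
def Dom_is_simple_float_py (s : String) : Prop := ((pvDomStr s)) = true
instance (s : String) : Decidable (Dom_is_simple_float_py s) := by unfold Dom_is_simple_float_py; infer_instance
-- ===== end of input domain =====

-- B changes the decomposition only: one character scan with a dot counter instead of splitting on the dot and looping over the parts; same O(n) cost.

-- ===== PORT A =====
-- the 'for part in parts' loop with its early return
def aPartsLoop : List (List Char) → Bool
  | [] => true
  | p :: ps => if !p.isEmpty && !PySem.Chars.strIsdigit p then false else aPartsLoop ps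

def is_simple_float_py (s : String) : Bool :=
  if s.toList.isEmpty then false
  else
    let parts := PySem.Chars.splitOn s.toList ['.']
    if parts.length > 2 then false
    else aPartsLoop parts

-- ===== PORT B =====
-- the 'for c in s' scan with the dot counter and early returns
def bScan : List Char → Nat → Bool
  | [], _ => true
  | c :: cs, dots =>
    if c == '.' then
      if dots + 1 > 1 then false else bScan cs (dots + 1)
    else if !PySem.Chars.isdigit c then false
    else bScan cs dots

def is_simple_float_py_alt (s : String) : Bool :=
  if s.toList.isEmpty then false else bScan s.toList 0

-- ===== PRECONDITION & SPEC =====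
def Spec_is_simple_float_py (s : String) (out : Bool) : Prop := out = is_simple_float_py_alt s
instance (s : String) (out : Bool) : Decidable (Spec_is_simple_float_py s out) := by unfold Spec_is_simple_float_py; infer_instance

-- ===== CLAIM (what is proved, stated in full; the proofs are below) =====
def Claim_equal_is_simple_float_py : Prop := ∀ (s : String), Dom_is_simple_float_py s → Spec_is_simple_float_py s (is_simple_float_py s)

-- ===== LEMMAS AND PROOFS =====

-- proof-side model of splitting on '.'
def splitDot (pre : List Char) : List Char → List (List Char)
  | [] => [pre]
  | c :: rest => if c = '.' then pre :: splitDot [] rest else splitDot (pre ++ [c]) rest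

theorem splitOn_go_eq (l : List Char) : ∀ (fuel : Nat) (cur : List Char) (acc : List (List Char)),
    l.length ≤ fuel →
    PySem.Chars.splitOn.go ['.'] fuel l cur acc = acc.reverse ++ splitDot cur.reverse l := by
  induction l with
  | nil =>
    intro fuel cur acc _
    cases fuel <;> simp [PySem.Chars.splitOn.go, splitDot]
  | cons c rest ih =>
    intro fuel cur acc hf
    cases fuel with
    | zero => simp at hf
    | succ fuel =>
      simp only [List.length_cons] at hf
      by_cases hc : c = '.'
      · subst hc
        have hpre : List.isPrefixOf ['.'] ('.' :: rest) = true := by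
          simp [List.isPrefixOf]
        rw [PySem.Chars.splitOn.go, if_pos hpre]
        simp only [List.length_cons, List.length_nil, List.drop_succ_cons, List.drop_zero]
        rw [ih fuel [] (cur.reverse :: acc) (by omega)]
        simp [splitDot]
      · have hpre : List.isPrefixOf ['.'] (c :: rest) = false := by
          simp [List.isPrefixOf, Ne.symm hc]
        rw [PySem.Chars.splitOn.go, if_neg (by simp [hpre])]
        rw [ih fuel (c :: cur) acc (by omega)]
        simp [splitDot, hc]

theorem splitOn_dot (l : List Char) : PySem.Chars.splitOn l ['.'] = splitDot [] l := by
  rw [PySem.Chars.splitOn, splitOn_go_eq l (l.length + 1) [] [] (by omega)]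
  simp

theorem length_splitDot (l : List Char) : ∀ pre, (splitDot pre l).length = l.count '.' + 1 := by
  induction l with
  | nil => intro pre; simp [splitDot]
  | cons c rest ih =>
    intro pre
    by_cases hc : c = '.'
    · subst hc; simp [splitDot, ih]
    · simp [splitDot, hc, ih]

theorem aPartsLoop_eq (parts : List (List Char)) :
    aPartsLoop parts = parts.all (fun p => p.all PySem.Chars.isdigit) := by
  induction parts with
  | nil => rfl
  | cons p ps ih =>
    by_cases hp : p.isEmpty
    · have : p = [] := by simpa [List.isEmpty_iff] using hp
      subst this
      simp [aPartsLoop, ih]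
    · simp only [aPartsLoop, PySem.Chars.strIsdigit, hp, ih, List.all_cons]
      by_cases hd : p.all PySem.Chars.isdigit <;> simp [hd]

theorem all_splitDot (l : List Char) : ∀ pre,
    (splitDot pre l).all (fun p => p.all PySem.Chars.isdigit)
      = (pre.all PySem.Chars.isdigit && l.all (fun c => c == '.' || PySem.Chars.isdigit c)) := by
  induction l with
  | nil => intro pre; simp [splitDot]
  | cons c rest ih =>
    intro pre
    by_cases hc : c = '.'
    · subst hc
      simp [splitDot, ih]
    · have hcb : (c == '.') = false := by simp [hc]
      simp only [splitDot, if_neg hc, ih]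
      simp [hcb, Bool.and_assoc]

theorem bScan_eq (cs : List Char) : ∀ (dots : Nat), dots ≤ 1 →
    bScan cs dots
      = (decide (cs.count '.' + dots ≤ 1) && cs.all (fun c => c == '.' || PySem.Chars.isdigit c)) := by
  induction cs with
  | nil => intro dots h; simp [bScan]; omega
  | cons c rest ih =>
    intro dots h
    by_cases hc : c = '.'
    · subst hc
      by_cases hd : dots + 1 > 1
      · simp [bScan, hd]
        omega
      · have hdots : dots = 0 := by omega
        subst hdots
        rw [show bScan ('.' :: rest) 0 = bScan rest 1 by simp [bScan]]
        rw [ih 1 (by omega)]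
        simp
    · simp only [bScan, beq_iff_eq, hc, if_false, List.count_cons, List.all_cons]
      by_cases hd : PySem.Chars.isdigit c
      · rw [if_neg (by simp [hd]), ih dots h]
        simp [hd]
      · simp [hd, hc]

-- ===== VERDICT (by name: the statement is the Claim_ definition above) =====
theorem is_simple_float_py_spec : Claim_equal_is_simple_float_py := by
  intro s _
  unfold Spec_is_simple_float_py is_simple_float_py is_simple_float_py_alt
  by_cases he : s.toList.isEmpty
  · simp [he]
  · rw [if_neg he, if_neg he]
    show (if (PySem.Chars.splitOn s.toList ['.']).length > 2 then false
          else aPartsLoop (PySem.Chars.splitOn s.toList ['.'])) = _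
    rw [splitOn_dot, bScan_eq s.toList 0 (by omega)]
    rw [aPartsLoop_eq, all_splitDot]
    simp only [length_splitDot, List.all_nil, Bool.true_and]
    split_ifs with h
    · have hc' : ¬ (s.toList.count '.' ≤ 1) := by omega
      simp [hc']
    · have hc' : s.toList.count '.' ≤ 1 := by omega
      simp [hc']
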